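-- pv_equiv track=rewrite | github.com/RafiZahedi/algorithms-and-implementations | Leetcode/Constest/397/B.py | max_energy
-- ===== SOURCE A (Python) =====
-- def max_energy(energy, k):
--     # maybe we use recursion???
--
--     def max_energy_helper(i, dp):
--         if i >= len(energy):
--             return 0
--         if dp[i] != -1001:
--             return dp[i]
--         dp[i] = energy[i] + max_energy_helper(i + k, dp)
--         return dp[i]
--
--     # using the biggest number that input gives me
--     dp = [-1001] * (len(energy) + 1)
--     return max(max_energy_helper(i, dp) for i in range(len(energy)))
-- ===== SOURCE B (Python) =====
-- def max_energy(energy, k):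
--     n = len(energy)
--     dp = [0] * n
--     for i in range(n - 1, -1, -1):
--         dp[i] = energy[i] + (dp[i + k] if i + k < n else 0)
--     return max(dp)
-- ===== Notes on version B (the rewrite author's own statement) =====
-- stated objective: faster
-- what changed: Replaced the memoized top-down recursion with a bottom-up backward loop filling a dp table and taking max(dp).
import Mathlib
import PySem

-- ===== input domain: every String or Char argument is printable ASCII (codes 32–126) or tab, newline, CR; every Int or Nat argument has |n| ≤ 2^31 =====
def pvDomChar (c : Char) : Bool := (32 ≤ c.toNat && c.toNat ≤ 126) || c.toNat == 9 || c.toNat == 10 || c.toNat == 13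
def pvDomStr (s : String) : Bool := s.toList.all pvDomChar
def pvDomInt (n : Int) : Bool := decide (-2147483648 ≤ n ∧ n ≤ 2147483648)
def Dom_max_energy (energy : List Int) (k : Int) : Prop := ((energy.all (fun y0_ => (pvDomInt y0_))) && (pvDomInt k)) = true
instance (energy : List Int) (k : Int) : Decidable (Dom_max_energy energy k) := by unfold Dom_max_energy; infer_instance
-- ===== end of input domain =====

-- B replaces A's memoized top-down recursion by a bottom-up backward dp loop; equal on nonempty energy with k ≥ 1.

-- ===== PORT A =====
-- memoized recursive helper; the memo list dp is threaded through (Python mutates it in place).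
-- fuel = energy.length + 1 bounds the recursion depth (each call increases i by k ≥ 1 under Pre_);
-- fuel 0 returns 0, reachable only where the Python diverges (outside Pre_).
def maxEnergyHelper (energy : List Int) (k : Int) : Nat → Int → List Int → Int × List Int
  | 0, _, dp => (0, dp)
  | fuel+1, i, dp =>
    if i ≥ (energy.length : Int) then (0, dp)
    else if PySem.List.pyGetD dp i (-1001) ≠ -1001 then (PySem.List.pyGetD dp i (-1001), dp)
    else
      let r := maxEnergyHelper energy k fuel (i + k) dp
      let v := PySem.List.pyGetD energy i 0 + r.1
      (v, PySem.List.pySetD r.2 i v)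

def max_energy (energy : List Int) (k : Int) : Int :=
  let dp0 : List Int := List.replicate (energy.length + 1) (-1001)
  -- max(gen): running maximum, first element initializes (ValueError on empty → Pre_)
  let res := (PySem.List.pyRange 0 (energy.length : Int) 1).foldl
      (fun (acc : Option Int × List Int) i =>
        let r := maxEnergyHelper energy k (energy.length + 1) i acc.2
        (some (match acc.1 with | none => r.1 | some m => max m r.1), r.2))
      (none, dp0)
  res.1.getD 0

-- ===== PORT B =====
def max_energy_alt (energy : List Int) (k : Int) : Int :=
  let n : Int := (energy.length : Int)
  let dp := (PySem.List.pyRange (n - 1) (-1) (-1)).foldl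
      (fun (dp : List Int) i =>
        PySem.List.pySetD dp i (PySem.List.pyGetD energy i 0 +
          (if i + k < n then PySem.List.pyGetD dp (i + k) 0 else 0)))
      (List.replicate energy.length 0)
  -- max(dp): ValueError on empty → Pre_
  (PySem.List.max? dp (fun x => x)).getD 0

-- ===== PRECONDITION & SPEC =====
-- Pre_ excludes the empty list (Python max() raises ValueError in both) and k ≤ 0 (A recurses forever).
def Pre_max_energy (energy : List Int) (k : Int) : Prop := energy ≠ [] ∧ 1 ≤ k
instance (energy : List Int) (k : Int) : Decidable (Pre_max_energy energy k) := by
  unfold Pre_max_energy; infer_instance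

def pvWitness_max_energy : List Int × Int := ([3, -2, 5], 2)

def Spec_max_energy (energy : List Int) (k : Int) (out : Int) : Prop := out = max_energy_alt energy k
instance (energy : List Int) (k : Int) (out : Int) : Decidable (Spec_max_energy energy k out) := by
  unfold Spec_max_energy; infer_instance

-- ===== CLAIM (what is proved, stated in full; the proofs are below) =====
def Claim_equal_max_energy : Prop := ∀ (energy : List Int) (k : Int), Dom_max_energy energy k → Pre_max_energy energy k → Spec_max_energy energy k (max_energy energy k)

-- ===== LEMMAS AND PROOFS =====

theorem pyGetD_nn (xs : List Int) (i : Int) (d : Int) (h0 : 0 ≤ i) :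
    PySem.List.pyGetD xs i d = xs.getD i.toNat d := by
  rw [PySem.List.pyGetD_of_nonneg xs d h0, List.getD_eq_getElem?_getD]


def sufP (energy : List Int) (d : Nat) (j : Nat) : Int :=
  if _h : j < energy.length then energy.getD j 0 + sufP energy d (j + d + 1) else 0
termination_by energy.length - j
decreasing_by omega


theorem sufP_of_ge (energy : List Int) (d j : Nat) (h : energy.length ≤ j) :
    sufP energy d j = 0 := by
  rw [sufP]; simp [Nat.not_lt.mpr h]


def ValidMemo (energy : List Int) (k : Int) (dp : List Int) : Prop :=
  dp.length = energy.length + 1 ∧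
  ∀ t : Nat, t < energy.length →
    dp.getD t (-1001) = -1001 ∨ dp.getD t (-1001) = sufP energy (k.toNat - 1) t


theorem sufP_step (energy : List Int) (d : Nat) (j : Nat) (h : j < energy.length) :
    sufP energy d j = energy.getD j 0 + sufP energy d (j + d + 1) := by
  conv_lhs => rw [sufP]
  rw [dif_pos h]


theorem helper_correct (energy : List Int) (k : Int) (hk : 1 ≤ k) :
    ∀ (fuel : Nat) (i : Int) (dp : List Int), 0 ≤ i →
      energy.length < i.toNat + fuel → ValidMemo energy k dp →
      (maxEnergyHelper energy k fuel i dp).1 = sufP energy (k.toNat - 1) i.toNat ∧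
      ValidMemo energy k (maxEnergyHelper energy k fuel i dp).2 := by
  intro fuel
  induction fuel with
  | zero =>
    intro i dp h0 hf hv
    simp only [maxEnergyHelper]
    exact ⟨(sufP_of_ge _ _ _ (by omega)).symm, hv⟩
  | succ fuel ih =>
    intro i dp h0 hf hv
    by_cases hge : i ≥ (energy.length : Int)
    · simp only [maxEnergyHelper, if_pos hge]
      exact ⟨(sufP_of_ge _ _ _ (by omega)).symm, hv⟩
    · have hlt : i.toNat < energy.length := by omega
      rw [maxEnergyHelper, if_neg hge, pyGetD_nn dp i _ h0]
      by_cases hmemo : dp.getD i.toNat (-1001) ≠ -1001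
      · rw [if_pos hmemo]
        rcases hv.2 i.toNat hlt with h | h
        · exact absurd h hmemo
        · exact ⟨h, hv⟩
      · rw [if_neg hmemo]
        dsimp only
        have h0' : (0:Int) ≤ i + k := by omega
        have htn : (i + k).toNat = i.toNat + (k.toNat - 1) + 1 := by omega
        obtain ⟨hr1, hr2⟩ := ih (i + k) dp h0' (by omega) hv
        have hval : PySem.List.pyGetD energy i 0 + (maxEnergyHelper energy k fuel (i + k) dp).1
            = sufP energy (k.toNat - 1) i.toNat := by
          rw [pyGetD_nn energy i 0 h0, hr1, htn, sufP_step energy (k.toNat - 1) i.toNat hlt]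
        have hlen2 : (maxEnergyHelper energy k fuel (i + k) dp).2.length = energy.length + 1 := hr2.1
        refine ⟨hval, ?_⟩
        rw [PySem.List.pySetD_of_nonneg _ _ h0]
        refine ⟨by rw [List.length_set]; exact hr2.1, ?_⟩
        intro t ht
        by_cases hti : t = i.toNat
        · right
          subst hti
          rw [List.getD_eq_getElem?_getD, List.getElem?_set_self (by omega), Option.getD_some]
          exact hval
        · rw [List.getD_eq_getElem?_getD, List.getElem?_set_ne (by omega),
              ← List.getD_eq_getElem?_getD]
          exact hr2.2 t ht


theorem aFold (energy : List Int) (k : Int) (hk : 1 ≤ k) :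
    ∀ (l : List Int) (acc : Option Int) (dp : List Int), ValidMemo energy k dp →
      (∀ i ∈ l, (0:Int) ≤ i) →
      (l.foldl (fun (acc : Option Int × List Int) i =>
          let r := maxEnergyHelper energy k (energy.length + 1) i acc.2
          (some (match acc.1 with | none => r.1 | some m => max m r.1), r.2))
        (acc, dp)).1
      = l.foldl (fun (a : Option Int) i =>
          some (match a with
                | none => sufP energy (k.toNat - 1) i.toNat
                | some m => max m (sufP energy (k.toNat - 1) i.toNat))) acc := by
  intro l
  induction l with
  | nil => intro acc dp _ _; rfl
  | cons x l ih =>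
    intro acc dp hv hnn
    have hx : (0:Int) ≤ x := hnn x (by simp)
    obtain ⟨h1, h2⟩ := helper_correct energy k hk (energy.length + 1) x dp hx (by omega) hv
    simp only [List.foldl_cons]
    rw [ih _ _ h2 (fun i hi => hnn i (by simp [hi]))]
    congr 1
    rw [h1]


theorem optFold (f : Int → Int) :
    ∀ (l : List Int) (m : Int),
      l.foldl (fun (a : Option Int) i =>
          some (match a with | none => f i | some m => max m (f i))) (some m)
      = some (l.foldl (fun m i => max m (f i)) m) := by
  intro l
  induction l with
  | nil => intro m; rfl
  | cons x l ih => intro m; simp only [List.foldl_cons]; rw [ih]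


theorem bLoop (energy : List Int) (k : Int) (hk : 1 ≤ k) :
    ∀ (j : Nat), j ≤ energy.length → ∀ dp : List Int, dp.length = energy.length →
      (∀ t : Nat, j ≤ t → t < energy.length → dp.getD t 0 = sufP energy (k.toNat - 1) t) →
      ((PySem.List.pyRange ((j:Int) - 1) (-1) (-1)).foldl
          (fun (dp : List Int) i =>
            PySem.List.pySetD dp i (PySem.List.pyGetD energy i 0 +
              (if i + k < (energy.length : Int) then PySem.List.pyGetD dp (i + k) 0 else 0)))
          dp).length = energy.length ∧
      ∀ t : Nat, t < energy.length →
        ((PySem.List.pyRange ((j:Int) - 1) (-1) (-1)).foldl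
          (fun (dp : List Int) i =>
            PySem.List.pySetD dp i (PySem.List.pyGetD energy i 0 +
              (if i + k < (energy.length : Int) then PySem.List.pyGetD dp (i + k) 0 else 0)))
          dp).getD t 0 = sufP energy (k.toNat - 1) t := by
  intro j
  induction j with
  | zero =>
    intro _ dp hlen hinv
    rw [show ((0:Nat):Int) - 1 = -1 by norm_num, PySem.List.pyRange_neg_one_eq_nil (by norm_num)]
    exact ⟨hlen, fun t ht => hinv t (Nat.zero_le t) ht⟩
  | succ j ih =>
    intro hj dp hlen hinv
    have hjlt : j < energy.length := by omega
    rw [show ((j+1:Nat):Int) - 1 = (j:Int) by push_cast; ring,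
        PySem.List.pyRange_neg_one_cons (by omega : (-1:Int) < (j:Int)), List.foldl_cons]
    -- the first iteration writes S j at index j
    set v := PySem.List.pyGetD energy (j:Int) 0 +
        (if (j:Int) + k < (energy.length : Int) then PySem.List.pyGetD dp ((j:Int) + k) 0 else 0) with hv
    have hvS : v = sufP energy (k.toNat - 1) j := by
      rw [hv, pyGetD_nn energy _ 0 (by omega), Int.toNat_natCast,
          sufP_step energy (k.toNat - 1) j hjlt]
      congr 1
      by_cases hik : (j:Int) + k < (energy.length : Int)
      · rw [if_pos hik, pyGetD_nn dp _ 0 (by omega)]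
        have htn : ((j:Int) + k).toNat = j + (k.toNat - 1) + 1 := by omega
        rw [htn]
        exact hinv _ (by omega) (by omega)
      · rw [if_neg hik, sufP_of_ge _ _ _ (by omega)]
    have hset : PySem.List.pySetD dp (j:Int) v = dp.set j v := by
      rw [PySem.List.pySetD_of_nonneg _ _ (by omega), Int.toNat_natCast]
    rw [hset]
    refine ih (by omega) (dp.set j v) (by rw [List.length_set]; exact hlen) ?_
    intro t htj htl
    by_cases htjj : t = j
    · subst htjj
      rw [List.getD_eq_getElem?_getD, List.getElem?_set_self (by omega), Option.getD_some, hvS]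
    · rw [List.getD_eq_getElem?_getD, List.getElem?_set_ne (by omega), ← List.getD_eq_getElem?_getD]
      exact hinv t (by omega) htl


theorem main_eq (energy : List Int) (k : Int) (hne : energy ≠ []) (hk : 1 ≤ k) :
    max_energy energy k = max_energy_alt energy k := by
  have hn : 1 ≤ energy.length := List.length_pos_of_ne_nil hne
  have hv0 : ValidMemo energy k (List.replicate (energy.length + 1) (-1001)) := by
    refine ⟨by simp, ?_⟩
    intro t ht
    left
    rw [List.getD_eq_getElem?_getD, List.getElem?_replicate]
    simp [Nat.lt_succ_of_lt ht]
  -- A side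
  have hA : max_energy energy k
      = ((PySem.List.pyRange 0 (energy.length : Int) 1).foldl
          (fun (a : Option Int) i =>
            some (match a with
                  | none => sufP energy (k.toNat - 1) i.toNat
                  | some m => max m (sufP energy (k.toNat - 1) i.toNat))) none).getD 0 := by
    unfold max_energy
    dsimp only
    congr 1
    exact aFold energy k hk _ none _ hv0
      (fun i hi => ((PySem.List.mem_pyRange_one).mp hi).1)
  have hcons : PySem.List.pyRange 0 (energy.length : Int) 1
      = 0 :: PySem.List.pyRange 1 (energy.length : Int) 1 := by
    rw [PySem.List.pyRange_one_cons (by exact_mod_cast hn)]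
    norm_num
  have hA2 : max_energy energy k
      = (PySem.List.pyRange 1 (energy.length : Int) 1).foldl
          (fun m i => max m (sufP energy (k.toNat - 1) i.toNat)) (sufP energy (k.toNat - 1) 0) := by
    rw [hA, hcons, List.foldl_cons]
    rw [optFold (fun i => sufP energy (k.toNat - 1) i.toNat)]
    rfl
  -- B side
  obtain ⟨hlen', hget'⟩ := bLoop energy k hk energy.length (le_refl _)
      (List.replicate energy.length 0) (by simp)
      (fun t ht htl => absurd htl (by omega))
  set dp' := (PySem.List.pyRange ((energy.length : Int) - 1) (-1) (-1)).foldl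
      (fun (dp : List Int) i =>
        PySem.List.pySetD dp i (PySem.List.pyGetD energy i 0 +
          (if i + k < (energy.length : Int) then PySem.List.pyGetD dp (i + k) 0 else 0)))
      (List.replicate energy.length 0) with hdp'
  have hmap : dp' = (PySem.List.pyRange 0 (energy.length : Int) 1).map
      (fun i => sufP energy (k.toNat - 1) i.toNat) := by
    apply List.ext_getElem
    · rw [hlen', List.length_map, PySem.List.length_pyRange_one]
      omega
    · intro t h1 h2
      rw [List.getElem_map, PySem.List.getElem_pyRange_one]
      have ht : t < energy.length := by rw [hlen'] at h1; exact h1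
      have := hget' t ht
      rw [List.getD_eq_getElem?_getD, List.getElem?_eq_getElem h1, Option.getD_some] at this
      rw [this]
      congr 1
      omega
  have hB : max_energy_alt energy k
      = ((PySem.List.max? dp' (fun x => x)).getD 0) := by
    unfold max_energy_alt
    rfl
  rw [hB, hmap, hcons, List.map_cons, PySem.List.max?_id_cons, Option.getD_some, List.foldl_map,
      hA2]
  norm_num


-- ===== VERDICT (by name: the statement is the Claim_ definition above) =====
theorem max_energy_spec : Claim_equal_max_energy := by
  intro energy k _ hp
  unfold Spec_max_energy
  exact main_eq energy k hp.1 hp.2
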